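-- pv_equiv track=rewrite | github.com/2018007956/Algorithm | Neul-bo/389479.py | solution
-- ===== SOURCE A (Python) =====
-- def solution(players, m, k):
--     history = [] # 증설 횟수
--
--     for player in players:
--         total = sum((history + [1])[-k:]) * m # 가능한 최대 인원 수
--         if total > player:
--             history = history + [0]
--         else: # 서버 증설
--             add = (player - total) // m + 1
--             history += [add]
--
--     return sum(history)
-- ===== SOURCE B (Python) =====
-- def solution(players, m, k):
--     history = []
--     window = 0  # running sum of the last k-1 expansion counts
--     for player in players:
--         total = (window + 1) * m
--         if total > player:
--             add = 0
--         else: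
--             add = (player - total) // m + 1
--         history.append(add)
--         window += add
--         if len(history) >= k:
--             window -= history[len(history) - k]
--     return sum(history)
-- ===== Notes on version B (the rewrite author's own statement) =====
-- stated objective: faster
-- what changed: B keeps an incremental sliding-window running sum of the last k-1 expansion counts (add the new entry, subtract the one leaving the window) instead of A's re-slicing and re-summing the last-k window for every player; Pre_ excludes k <= 0, where A's 'last k' window is an accident of Python's zero/negative slice semantics and B's index into the window raises, and m = 0 with some player >= 0, where A raises ZeroDivisionError.
-- outside the precondition, e.g. on solution([5, 5], 3, 0): A returns 1, B raises IndexError; on solution([5], 3, -1): A returns 2, B raises IndexError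
import Mathlib
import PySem

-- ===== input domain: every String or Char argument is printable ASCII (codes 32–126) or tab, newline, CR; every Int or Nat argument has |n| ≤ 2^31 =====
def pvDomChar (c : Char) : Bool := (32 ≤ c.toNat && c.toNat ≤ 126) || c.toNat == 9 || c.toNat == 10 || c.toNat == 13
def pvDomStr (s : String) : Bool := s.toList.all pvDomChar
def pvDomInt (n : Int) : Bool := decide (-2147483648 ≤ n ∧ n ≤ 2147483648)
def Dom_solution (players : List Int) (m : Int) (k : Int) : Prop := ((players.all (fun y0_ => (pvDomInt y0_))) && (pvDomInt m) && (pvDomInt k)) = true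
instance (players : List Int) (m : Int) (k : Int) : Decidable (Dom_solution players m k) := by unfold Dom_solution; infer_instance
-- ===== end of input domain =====

-- B replaces A's per-player re-summation of the last-k window by an incremental
-- sliding-window running sum (objective: faster).

-- ===== PORT A =====
-- loop body of A, one player: re-sums the last-k window of history+[1] each time
def stepA (m k : Int) (history : List Int) (player : Int) : List Int :=
  let total := (PySem.List.slice (history ++ [1]) (some (-k)) none).sum * m
  if total > player then history ++ [0]
  else history ++ [PySem.Int.floordiv (player - total) m + 1]

def solution (players : List Int) (m : Int) (k : Int) : Int :=
  (players.foldl (stepA m k) ([] : List Int)).sum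

-- ===== PORT B =====
-- loop body of B, one player: state is (history, window running sum)
def stepB (m k : Int) (st : List Int × Int) (player : Int) : List Int × Int :=
  let total := (st.2 + 1) * m
  let add := if total > player then (0 : Int) else PySem.Int.floordiv (player - total) m + 1
  let history := st.1 ++ [add]
  let window := st.2 + add
  if k ≤ (history.length : Int) then
    (history, window - PySem.List.pyGetD history ((history.length : Int) - k) 0)
  else (history, window)

def solution_alt (players : List Int) (m : Int) (k : Int) : Int :=
  ((players.foldl (stepB m k) (([] : List Int), (0 : Int))).1).sum

-- ===== PRECONDITION & SPEC =====
-- Pre_ excludes k ≤ 0 (A still returns there, but its 'last k' window is an accident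
-- of Python's zero/negative slice semantics and B's window index raises IndexError),
-- and m = 0 with some player ≥ 0 (there A raises ZeroDivisionError).
def Pre_solution (players : List Int) (m : Int) (k : Int) : Prop :=
  1 ≤ k ∧ (m = 0 → ∀ p ∈ players, p < 0)
instance (players : List Int) (m : Int) (k : Int) : Decidable (Pre_solution players m k) := by
  unfold Pre_solution; infer_instance

def pvWitness_solution : List Int × Int × Int := ([3, 1, 4], 2, 2)

def Spec_solution (players : List Int) (m : Int) (k : Int) (out : Int) : Prop := out = solution_alt players m k
instance (players : List Int) (m : Int) (k : Int) (out : Int) : Decidable (Spec_solution players m k out) := by unfold Spec_solution; infer_instance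

-- ===== CLAIM (what is proved, stated in full; the proofs are below) =====
def Claim_equal_solution : Prop := ∀ (players : List Int) (m : Int) (k : Int), Dom_solution players m k → Pre_solution players m k → Spec_solution players m k (solution players m k)

-- ===== LEMMAS AND PROOFS =====

-- the window value B maintains, expressed as a function of A's history
def winOf (h : List Int) (k : Int) : Int :=
  (h.drop (h.length + 1 - k.toNat)).sum

theorem drop_succ_sum (h : List Int) (j : Nat) (hj : j < h.length) :
    (h.drop (j + 1)).sum = (h.drop j).sum - h[j] := by
  have h1 := List.sum_take_add_sum_drop h j
  have h2 := List.sum_take_add_sum_drop h (j + 1)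
  have h3 : (h.take (j + 1)).sum = (h.take j).sum + h[j] := List.sum_take_succ h j hj
  omega

-- A's window sum equals B's running window plus the appended 1, for 1 ≤ k
theorem sliceA_sum (h : List Int) (k : Int) (hk : 1 ≤ k) :
    (PySem.List.slice (h ++ [1]) (some (-k)) none).sum = winOf h k + 1 := by
  rw [PySem.List.slice_some_none]
  have hclamp : PySem.List.clampIdx (h ++ [1]).length (-k) = h.length + 1 - k.toNat := by
    have h1 : 0 < k.toNat := by omega
    have hkn : -k = -((k.toNat : Nat) : Int) := by omega
    rw [hkn, PySem.List.clampIdx_neg_natCast _ _ h1]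
    simp
  rw [hclamp]
  have hle : h.length + 1 - k.toNat ≤ h.length := by omega
  rw [List.drop_append_of_le_length hle, List.sum_append]
  simp [winOf]

-- B's end-of-iteration window update produces winOf of the new history
theorem window_update (k : Int) (hk : 1 ≤ k) (h : List Int) (a : Int) :
    (if k ≤ (((h ++ [a]).length : Nat) : Int) then
       (h ++ [a], winOf h k + a - PySem.List.pyGetD (h ++ [a]) ((((h ++ [a]).length : Nat) : Int) - k) 0)
     else (h ++ [a], winOf h k + a))
    = (h ++ [a], winOf (h ++ [a]) k) := by
  set n := h.length with hn
  have hlen : (h ++ [a] : List Int).length = n + 1 := by simp [hn]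
  have hwin1 : winOf h k + a = ((h ++ [a]).drop (n + 1 - k.toNat)).sum := by
    have hle : n + 1 - k.toNat ≤ n := by omega
    rw [List.drop_append_of_le_length hle, List.sum_append]
    simp [winOf, hn]
  by_cases hcase : k ≤ ((n : Int) + 1)
  · rw [if_pos (by rw [hlen]; push_cast; omega)]
    have hidx : (((h ++ [a] : List Int).length : Nat) : Int) - k = ((n + 1 - k.toNat : Nat) : Int) := by
      rw [hlen]; omega
    rw [hidx, PySem.List.pyGetD_natCast]
    have hlt : n + 1 - k.toNat < (h ++ [a]).length := by rw [hlen]; omega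
    rw [List.getD_eq_getElem _ _ hlt, hwin1]
    have hw2 : winOf (h ++ [a]) k = ((h ++ [a]).drop ((n + 1 - k.toNat) + 1)).sum := by
      unfold winOf; rw [hlen]; congr 2; omega
    rw [hw2, drop_succ_sum _ _ hlt]
  · rw [if_neg (by rw [hlen]; push_cast; omega)]
    have hw2 : winOf (h ++ [a]) k = ((h ++ [a]).drop (n + 1 - k.toNat)).sum := by
      unfold winOf; rw [hlen]; congr 2; omega
    rw [hw2, hwin1]

-- one coupled step: B's state follows A's history with the window invariant
theorem step_coupled (m k : Int) (hk : 1 ≤ k) (h : List Int) (player : Int) :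
    stepB m k (h, winOf h k) player = (stepA m k h player, winOf (stepA m k h player) k) := by
  simp only [stepA, stepB]
  rw [sliceA_sum h k hk]
  set a : Int := if (winOf h k + 1) * m > player then (0 : Int)
      else PySem.Int.floordiv (player - (winOf h k + 1) * m) m + 1 with ha
  have hsplit : (if (winOf h k + 1) * m > player then h ++ [(0 : Int)]
      else h ++ [PySem.Int.floordiv (player - (winOf h k + 1) * m) m + 1]) = h ++ [a] := by
    rw [ha]; split_ifs <;> rfl
  rw [hsplit]
  exact window_update k hk h a

theorem loop_coupled (players : List Int) (m k : Int) (hk : 1 ≤ k) (h : List Int) :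
    players.foldl (stepB m k) (h, winOf h k)
      = (players.foldl (stepA m k) h, winOf (players.foldl (stepA m k) h) k) := by
  induction players generalizing h with
  | nil => rfl
  | cons p ps ih =>
    simp only [List.foldl_cons]
    rw [step_coupled m k hk h p]
    exact ih _

-- ===== VERDICT (by name: the statement is the Claim_ definition above) =====
theorem solution_spec : Claim_equal_solution := by
  intro players m k _ hpre
  unfold Spec_solution solution solution_alt
  have h0 : (([] : List Int), (0 : Int)) = (([] : List Int), winOf [] k) := by
    simp [winOf]
  rw [h0, loop_coupled players m k hpre.1 []]
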